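-- pv_equiv track=rewrite | github.com/NotKatsu/Number-Sort | number-sort/sorter.py | highestToLowest
-- ===== SOURCE A (Python) =====
-- def highestToLowest(numbers: list[int]) -> list[int]:
--     """Sort numbers Highest to Lowest, expects array to be passed returns array."""
--     result = []
--     lastNumber = None
--
--     for a in range(len(numbers)):
--         highestNumber = None
--         for b in range(len(numbers)):
--             if highestNumber is None or numbers[b] > highestNumber:
--                 if lastNumber is None or numbers[b] < lastNumber:
--                     highestNumber = numbers[b]
--         if highestNumber is None:
--             break
--         lastNumber = highestNumber
--         result.append(highestNumber)
--
--     return result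
-- ===== SOURCE B (Python) =====
-- def highestToLowest(numbers: list[int]) -> list[int]:
--     """Sort numbers Highest to Lowest, expects array to be passed returns array."""
--     result = []
--     last = None
--     for x in sorted(numbers, reverse=True):
--         if last is None or x != last:
--             result.append(x)
--             last = x
--     return result
-- ===== Notes on version B (the rewrite author's own statement) =====
-- stated objective: faster
-- what changed: Replaces A's repeated full-list max-scans (one per output element) with a single descending sort followed by one linear adjacent-deduplication pass.
import Mathlib
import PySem

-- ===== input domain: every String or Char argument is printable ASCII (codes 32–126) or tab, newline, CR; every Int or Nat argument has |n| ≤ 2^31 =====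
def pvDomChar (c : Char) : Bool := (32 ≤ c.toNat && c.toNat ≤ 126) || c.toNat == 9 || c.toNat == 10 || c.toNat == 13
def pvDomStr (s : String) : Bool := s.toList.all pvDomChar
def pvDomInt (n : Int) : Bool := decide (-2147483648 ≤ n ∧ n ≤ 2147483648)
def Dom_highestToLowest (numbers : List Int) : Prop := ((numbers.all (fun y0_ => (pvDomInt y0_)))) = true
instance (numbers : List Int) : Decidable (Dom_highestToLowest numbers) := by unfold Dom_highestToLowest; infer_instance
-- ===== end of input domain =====

-- B replaces A's O(n^2) repeated max-scanning with one descending sort plus one linear dedup pass (faster).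

-- ===== PORT A =====
-- inner 'for b in range(len(numbers))' loop: scans for the largest element below lastNumber
def pvInnerA (numbers : List Int) (lastNumber : Option Int) : Option Int :=
  numbers.foldl (fun highestNumber x =>
    if (match highestNumber with | none => true | some h => decide (x > h)) then
      if (match lastNumber with | none => true | some l => decide (x < l)) then some x
      else highestNumber
    else highestNumber) none

-- outer 'for a in range(len(numbers))' loop with its 'break', as fuel recursion
def pvOuterA (numbers : List Int) : Nat → List Int → Option Int → List Int
  | 0, result, _ => result
  | Nat.succ fuel, result, lastNumber =>
    match pvInnerA numbers lastNumber with
    | none => result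
    | some h => pvOuterA numbers fuel (result ++ [h]) (some h)

def highestToLowest (numbers : List Int) : List Int :=
  pvOuterA numbers numbers.length [] none

-- ===== PORT B =====
-- loop body of Source B's single pass over the sorted copy
def pvStepB (st : List Int × Option Int) (x : Int) : List Int × Option Int :=
  if (match st.2 with | none => true | some l => decide (x ≠ l)) then (st.1 ++ [x], some x)
  else st

def highestToLowest_alt (numbers : List Int) : List Int :=
  let ordered := PySem.List.sorted numbers (fun x => x) true
  (ordered.foldl pvStepB ([], none)).1

-- ===== PRECONDITION & SPEC =====
def Spec_highestToLowest (numbers : List Int) (out : List Int) : Prop := out = highestToLowest_alt numbers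
instance (numbers : List Int) (out : List Int) : Decidable (Spec_highestToLowest numbers out) := by unfold Spec_highestToLowest; infer_instance

-- ===== CLAIM (what is proved, stated in full; the proofs are below) =====
def Claim_equal_highestToLowest : Prop := ∀ (numbers : List Int), Dom_highestToLowest numbers → Spec_highestToLowest numbers (highestToLowest numbers)

-- ===== LEMMAS AND PROOFS =====

-- 'x is below the lastNumber bound' (the python test 'lastNumber is None or x < lastNumber')
def pvBelow (last : Option Int) (x : Int) : Bool :=
  match last with | none => true | some l => decide (x < l)

-- 'x exceeds the current highestNumber' (the python test 'highestNumber is None or x > highestNumber')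
def pvAbove (h : Option Int) (x : Int) : Bool :=
  match h with | none => true | some hv => decide (x > hv)

-- the body of A's inner loop, named for the proofs (definitionally the lambda in pvInnerA)
def pvF (last : Option Int) (highestNumber : Option Int) (x : Int) : Option Int :=
  if pvAbove highestNumber x then
    if pvBelow last x then some x
    else highestNumber
  else highestNumber

theorem pvInnerA_eq (numbers : List Int) (last : Option Int) :
    pvInnerA numbers last = numbers.foldl (pvF last) none := rfl

theorem pvF_cases (last : Option Int) (h : Option Int) (x : Int) :
    pvF last h x = h ∨ (pvF last h x = some x ∧ pvBelow last x = true) := by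
  unfold pvF
  by_cases h1 : pvAbove h x = true
  · by_cases h2 : pvBelow last x = true
    · right; rw [if_pos h1, if_pos h2]; exact ⟨rfl, h2⟩
    · left; rw [if_pos h1, if_neg h2]
  · left; rw [if_neg h1]

theorem pvF_mono (last : Option Int) (h : Option Int) (x a : Int) (ha : h = some a) :
    ∃ b, pvF last h x = some b ∧ a ≤ b := by
  subst ha
  unfold pvF
  by_cases h1 : pvAbove (some a) x = true
  · by_cases h2 : pvBelow last x = true
    · refine ⟨x, by rw [if_pos h1, if_pos h2], ?_⟩
      simp [pvAbove] at h1; omega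
    · exact ⟨a, by rw [if_pos h1, if_neg h2], le_refl a⟩
  · exact ⟨a, by rw [if_neg h1], le_refl a⟩

theorem pvF_top (last : Option Int) (h : Option Int) (x : Int) (hx : pvBelow last x = true) :
    ∃ b, pvF last h x = some b ∧ x ≤ b := by
  unfold pvF
  by_cases h1 : pvAbove h x = true
  · exact ⟨x, by rw [if_pos h1, if_pos hx], le_refl x⟩
  · cases h with
    | none => simp [pvAbove] at h1
    | some hv =>
      refine ⟨hv, by rw [if_neg h1], ?_⟩
      simp [pvAbove] at h1; omega

theorem pvF_go (last : Option Int) (l : List Int) : ∀ (acc : Option Int),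
    (l.foldl (pvF last) acc = acc ∨
      ∃ m, l.foldl (pvF last) acc = some m ∧ m ∈ l ∧ pvBelow last m = true) ∧
    (∀ a, acc = some a → ∃ m, l.foldl (pvF last) acc = some m ∧ a ≤ m) ∧
    (∀ x ∈ l, pvBelow last x = true → ∃ m, l.foldl (pvF last) acc = some m ∧ x ≤ m) := by
  induction l with
  | nil =>
    intro acc
    refine ⟨Or.inl rfl, ?_, by simp⟩
    intro a ha; exact ⟨a, by simp [ha], le_refl a⟩
  | cons y t ih =>
    intro acc
    have step : List.foldl (pvF last) acc (y :: t) = List.foldl (pvF last) (pvF last acc y) t := rfl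
    obtain ⟨ih1, ih2, ih3⟩ := ih (pvF last acc y)
    refine ⟨?_, ?_, ?_⟩
    · rcases pvF_cases last acc y with hc | ⟨hc, hb⟩
      · rw [step, hc]
        rcases (ih acc).1 with h1 | ⟨m, hm, hmem, hbm⟩
        · exact Or.inl h1
        · exact Or.inr ⟨m, hm, List.mem_cons_of_mem _ hmem, hbm⟩
      · rw [step]
        rcases ih1 with h1 | ⟨m', hm', hmem', hbm'⟩
        · right; exact ⟨y, by rw [h1, hc], List.mem_cons_self, hb⟩
        · right; exact ⟨m', hm', List.mem_cons_of_mem _ hmem', hbm'⟩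
    · intro a ha
      rcases pvF_mono last acc y a ha with ⟨b, hb, hab⟩
      rcases ih2 b hb with ⟨m, hm, hbm⟩
      exact ⟨m, by rw [step]; exact hm, le_trans hab hbm⟩
    · intro x hx hbx
      rcases List.mem_cons.mp hx with rfl | hxt
      · rcases pvF_top last acc x hbx with ⟨b, hb, hxb⟩
        rcases ih2 b hb with ⟨m, hm, hbm⟩
        exact ⟨m, by rw [step]; exact hm, le_trans hxb hbm⟩
      · rcases ih3 x hxt hbx with ⟨m, hm, hxm⟩
        exact ⟨m, by rw [step]; exact hm, hxm⟩

theorem pvInnerA_none (numbers : List Int) (last : Option Int)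
    (h : pvInnerA numbers last = none) : ∀ x ∈ numbers, pvBelow last x = false := by
  intro x hx
  by_contra hb
  have hb' : pvBelow last x = true := by simpa using hb
  obtain ⟨-, -, h3⟩ := pvF_go last numbers none
  rcases h3 x hx hb' with ⟨m, hm, -⟩
  rw [pvInnerA_eq] at h
  rw [h] at hm
  simp at hm

theorem pvInnerA_some (numbers : List Int) (last : Option Int) (m : Int)
    (h : pvInnerA numbers last = some m) :
    m ∈ numbers ∧ pvBelow last m = true ∧ ∀ x ∈ numbers, pvBelow last x = true → x ≤ m := by
  rw [pvInnerA_eq] at h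
  obtain ⟨h1, -, h3⟩ := pvF_go last numbers none
  rcases h1 with h1 | ⟨m', hm', hmem, hbm⟩
  · rw [h] at h1; simp at h1
  · rw [h] at hm'
    obtain rfl : m = m' := Option.some.inj hm'
    refine ⟨hmem, hbm, ?_⟩
    intro x hx hbx
    rcases h3 x hx hbx with ⟨m'', hm'', hxm⟩
    rw [h] at hm''
    obtain rfl : m = m'' := Option.some.inj hm''
    exact hxm

-- two strictly decreasing lists with the same members are equal
theorem pvUnique (l1 : List Int) : ∀ (l2 : List Int), l1.Pairwise (· > ·) → l2.Pairwise (· > ·) →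
    (∀ x, x ∈ l1 ↔ x ∈ l2) → l1 = l2 := by
  induction l1 with
  | nil =>
    intro l2 _ _ hmem
    cases l2 with
    | nil => rfl
    | cons b t2 => exact absurd ((hmem b).mpr List.mem_cons_self) (by simp)
  | cons a t1 ih =>
    intro l2 h1 h2 hmem
    cases l2 with
    | nil => exact absurd ((hmem a).mp List.mem_cons_self) (by simp)
    | cons b t2 =>
      have hab : a = b := by
        have ha2 : a ∈ b :: t2 := (hmem a).mp List.mem_cons_self
        have hb1 : b ∈ a :: t1 := (hmem b).mpr List.mem_cons_self
        rcases List.mem_cons.mp ha2 with h | h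
        · exact h
        · have : b > a := (List.pairwise_cons.mp h2).1 a h
          rcases List.mem_cons.mp hb1 with h' | h'
          · omega
          · have : a > b := (List.pairwise_cons.mp h1).1 b h'
            omega
      subst hab
      have htail : ∀ x, x ∈ t1 ↔ x ∈ t2 := by
        intro x
        constructor
        · intro hx
          have hlt : a > x := (List.pairwise_cons.mp h1).1 x hx
          have : x ∈ a :: t2 := (hmem x).mp (List.mem_cons_of_mem _ hx)
          rcases List.mem_cons.mp this with rfl | h
          · omega
          · exact h
        · intro hx
          have hlt : a > x := (List.pairwise_cons.mp h2).1 x hx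
          have : x ∈ a :: t1 := (hmem x).mpr (List.mem_cons_of_mem _ hx)
          rcases List.mem_cons.mp this with rfl | h
          · omega
          · exact h
      rw [ih t2 (List.pairwise_cons.mp h1).2 (List.pairwise_cons.mp h2).2 htail]

theorem pvOuterA_acc (numbers : List Int) (fuel : Nat) : ∀ (result : List Int) (last : Option Int),
    pvOuterA numbers fuel result last = result ++ pvOuterA numbers fuel [] last := by
  induction fuel with
  | zero => intro result last; simp [pvOuterA]
  | succ n ih =>
    intro result last
    simp only [pvOuterA]
    cases h : pvInnerA numbers last with
    | none => simp
    | some m =>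
      dsimp only
      rw [ih (result ++ [m]), ih ([] ++ [m])]
      simp

theorem pvOuterA_spec (numbers : List Int) (fuel : Nat) : ∀ (last : Option Int),
    (numbers.toFinset.filter (fun x => pvBelow last x = true)).card ≤ fuel →
    (pvOuterA numbers fuel [] last).Pairwise (· > ·) ∧
    (∀ x, x ∈ pvOuterA numbers fuel [] last ↔ x ∈ numbers ∧ pvBelow last x = true) := by
  induction fuel with
  | zero =>
    intro last hcard
    refine ⟨by simp [pvOuterA], ?_⟩
    intro x
    simp only [pvOuterA, List.not_mem_nil, false_iff]
    rintro ⟨hx, hbx⟩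
    have : x ∈ numbers.toFinset.filter (fun x => pvBelow last x = true) := by
      simp [List.mem_toFinset, hx, hbx]
    have := Finset.card_pos.mpr ⟨x, this⟩
    omega
  | succ n ih =>
    intro last hcard
    simp only [pvOuterA]
    cases h : pvInnerA numbers last with
    | none =>
      have hnone := pvInnerA_none numbers last h
      refine ⟨List.Pairwise.nil, ?_⟩
      intro x
      simp only [List.not_mem_nil, false_iff]
      rintro ⟨hx, hbx⟩
      rw [hnone x hx] at hbx
      exact Bool.noConfusion hbx
    | some m =>
      dsimp only
      obtain ⟨hmem, hbm, hmax⟩ := pvInnerA_some numbers last m h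
      rw [pvOuterA_acc]
      -- new bound set vs old
      have hsub : numbers.toFinset.filter (fun x => pvBelow (some m) x = true) =
          (numbers.toFinset.filter (fun x => pvBelow last x = true)).erase m := by
        ext x
        simp only [Finset.mem_filter, Finset.mem_erase, List.mem_toFinset, pvBelow]
        constructor
        · rintro ⟨hx, hlt⟩
          simp only [decide_eq_true_eq] at hlt
          refine ⟨by omega, hx, ?_⟩
          cases last with
          | none => rfl
          | some l =>
            simp only [decide_eq_true_eq]
            have : (m < l) := by simpa [pvBelow] using hbm
            omega
        · rintro ⟨hne, hx, hb⟩
          refine ⟨hx, ?_⟩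
          have hxm : x ≤ m := hmax x hx (by simpa [pvBelow] using hb)
          simp only [decide_eq_true_eq]
          omega
      have hmold : m ∈ numbers.toFinset.filter (fun x => pvBelow last x = true) := by
        simp [List.mem_toFinset, hmem, hbm]
      have hcard' : (numbers.toFinset.filter (fun x => pvBelow (some m) x = true)).card ≤ n := by
        rw [hsub, Finset.card_erase_of_mem hmold]
        have := Finset.card_pos.mpr ⟨m, hmold⟩
        omega
      obtain ⟨ihp, ihm⟩ := ih (some m) hcard'
      constructor
      · refine List.pairwise_cons.mpr ⟨?_, ihp⟩
        intro x hx
        have := (ihm x).mp hx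
        simp only [pvBelow, decide_eq_true_eq] at this
        omega
      · intro x
        simp only [List.cons_append, List.nil_append, List.mem_cons, ihm]
        constructor
        · rintro (rfl | ⟨hx, hb⟩)
          · exact ⟨hmem, hbm⟩
          · refine ⟨hx, ?_⟩
            simp only [pvBelow, decide_eq_true_eq] at hb
            cases last with
            | none => rfl
            | some l =>
              have : (m < l) := by simpa [pvBelow] using hbm
              simp only [pvBelow, decide_eq_true_eq]
              omega
        · rintro ⟨hx, hb⟩
          by_cases hxm : x = m
          · exact Or.inl hxm
          · right
            refine ⟨hx, ?_⟩
            have := hmax x hx hb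
            simp only [pvBelow, decide_eq_true_eq]
            omega

-- closed recursion computed by B's dedup fold
def pvDd : Option Int → List Int → List Int
  | _, [] => []
  | none, x :: t => x :: pvDd (some x) t
  | some l, x :: t => if x ≠ l then x :: pvDd (some x) t else pvDd (some l) t

theorem pvFoldB_eq (l : List Int) : ∀ (result : List Int) (last : Option Int),
    (l.foldl pvStepB (result, last)).1 = result ++ pvDd last l := by
  induction l with
  | nil => intro result last; simp [pvDd]
  | cons x t ih =>
    intro result last
    cases last with
    | none =>
      have : pvStepB (result, none) x = (result ++ [x], some x) := by simp [pvStepB]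
      rw [List.foldl_cons, this, ih]
      simp [pvDd]
    | some l =>
      by_cases hxl : x = l
      · subst hxl
        have : pvStepB (result, some x) x = (result, some x) := by simp [pvStepB]
        rw [List.foldl_cons, this, ih]
        simp [pvDd]
      · have : pvStepB (result, some l) x = (result ++ [x], some x) := by
          simp [pvStepB, hxl]
        rw [List.foldl_cons, this, ih]
        simp [pvDd, hxl]

theorem pvDd_spec (l : List Int) : ∀ (last : Option Int),
    l.Pairwise (fun a b => b ≤ a) →
    (∀ x ∈ l, match last with | none => True | some lv => x ≤ lv) →
    (pvDd last l).Pairwise (· > ·) ∧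
    (∀ x, x ∈ pvDd last l ↔ x ∈ l ∧ match last with | none => True | some lv => x ≠ lv) := by
  induction l with
  | nil =>
    intro last _ _
    exact ⟨List.Pairwise.nil, by simp [pvDd]⟩
  | cons x t ih =>
    intro last hpw hbound
    have hxt : ∀ y ∈ t, y ≤ x := (List.pairwise_cons.mp hpw).1
    have hpwt := (List.pairwise_cons.mp hpw).2
    have hboundx : ∀ y ∈ t, match (some x : Option Int) with | none => True | some lv => y ≤ lv := by
      intro y hy; exact hxt y hy
    obtain ⟨ihp, ihm⟩ := ih (some x) hpwt hboundx
    have consCase : (x :: pvDd (some x) t).Pairwise (· > ·) ∧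
        (∀ y, y ∈ x :: pvDd (some x) t ↔ y ∈ x :: t) := by
      constructor
      · refine List.pairwise_cons.mpr ⟨?_, ihp⟩
        intro y hy
        obtain ⟨hyt, hyx⟩ := (ihm y).mp hy
        have := hxt y hyt
        simp only at hyx
        omega
      · intro y
        simp only [List.mem_cons, ihm]
        constructor
        · rintro (rfl | ⟨hyt, -⟩)
          · exact Or.inl rfl
          · exact Or.inr hyt
        · rintro (rfl | hyt)
          · exact Or.inl rfl
          · by_cases hyx : y = x
            · exact Or.inl hyx
            · exact Or.inr ⟨hyt, hyx⟩
    cases last with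
    | none =>
      simp only [pvDd]
      refine ⟨consCase.1, ?_⟩
      intro y
      rw [consCase.2 y]
      simp
    | some lv =>
      by_cases hxl : x = lv
      · subst hxl
        simp only [pvDd]
        rw [if_neg (fun hcon => hcon rfl)]
        refine ⟨ihp, ?_⟩
        intro y
        rw [ihm y]
        simp only [List.mem_cons]
        constructor
        · rintro ⟨hyt, hyx⟩
          exact ⟨Or.inr hyt, hyx⟩
        · rintro ⟨(rfl | hyt), hyx⟩
          · exact absurd rfl hyx
          · exact ⟨hyt, hyx⟩
      · simp only [pvDd, if_pos hxl]
        refine ⟨consCase.1, ?_⟩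
        intro y
        rw [consCase.2 y]
        simp only [List.mem_cons]
        constructor
        · rintro (rfl | hyt)
          · exact ⟨Or.inl rfl, hxl⟩
          · refine ⟨Or.inr hyt, ?_⟩
            have h1 := hxt y hyt
            have h2 : x ≤ lv := hbound x List.mem_cons_self
            intro h; subst h
            omega
        · rintro ⟨(rfl | hyt), hyl⟩
          · exact Or.inl rfl
          · exact Or.inr hyt

-- ===== VERDICT (by name: the statement is the Claim_ definition above) =====
theorem highestToLowest_spec : Claim_equal_highestToLowest := by
  intro numbers _
  unfold Spec_highestToLowest highestToLowest highestToLowest_alt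
  -- A side
  have hcard : (numbers.toFinset.filter (fun x => pvBelow none x = true)).card ≤ numbers.length := by
    calc (numbers.toFinset.filter (fun x => pvBelow none x = true)).card
        ≤ numbers.toFinset.card := Finset.card_filter_le _ _
      _ ≤ numbers.length := numbers.toFinset_card_le
  obtain ⟨hAp, hAm⟩ := pvOuterA_spec numbers numbers.length none hcard
  -- B side
  set ordered := PySem.List.sorted numbers (fun x => x) true with hord
  have hperm : ordered.Perm numbers := PySem.List.sorted_perm numbers (fun x => x) true
  have hpw : ordered.Pairwise (fun a b => b ≤ a) :=
    PySem.List.sorted_pairwise_rev numbers (fun x => x)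
  obtain ⟨hBp, hBm⟩ := pvDd_spec ordered none hpw (by intro x hx; trivial)
  rw [pvFoldB_eq ordered [] none, List.nil_append]
  refine pvUnique _ _ hAp hBp ?_
  intro x
  rw [hAm x, hBm x]
  constructor
  · rintro ⟨hx, -⟩
    exact ⟨hperm.mem_iff.mpr hx, trivial⟩
  · rintro ⟨hx, -⟩
    exact ⟨hperm.mem_iff.mp hx, rfl⟩
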